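-- pv_equiv track=rewrite | github.com/ZoeyZheng666/NSGA | NSGA2.py | calculate_fuzzy_ti_for_each_node
-- ===== SOURCE A (Python) =====
-- def calculate_fuzzy_ti_for_each_node(paths, fuzzy_transport_time, transfer_info):
--     """
--     计算每个节点的模糊时间变量ti
--     """
--     # 初始化模糊时间为(0, 0, 0)
--     ti = (0, 0, 0)
--     ti_values = {paths[0]: ti}
--
--     # 遍历路径中的每一段
--     for i in range(len(paths) - 1):
--         current_node = paths[i]
--         next_node = paths[i + 1]
--
--         # 获取当前段的运输方式
--         transport_mode = None
--         for mode in fuzzy_transport_time[(current_node, next_node)]: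
--             transport_mode = mode
--             break
--
--         # 获取当前段的模糊运输时间
--         segment_fuzzy_time = fuzzy_transport_time[(current_node, next_node)][transport_mode]
--
--         # 更新模糊时间
--         ti = tuple(map(sum, zip(ti, segment_fuzzy_time)))
--
--         # 如果存在中转，获取模糊中转时间
--         if i < len(paths) - 2:
--             next_next_node = paths[i + 2]
--             if (transport_mode, next_next_node) in transfer_info:
--                 transfer_fuzzy_time = transfer_info[(transport_mode, next_next_node)]["换装时间"]
--                 ti = tuple(map(sum, zip(ti, transfer_fuzzy_time)))
--
--         ti_values[next_node] = ti
--
--     return ti_values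
-- ===== SOURCE B (Python) =====
-- def calculate_fuzzy_ti_for_each_node(paths, fuzzy_transport_time, transfer_info):
--     # Pass 1: one combined (segment + optional transfer) delta tuple per segment.
--     deltas = []
--     for i in range(len(paths) - 1):
--         modes = fuzzy_transport_time[(paths[i], paths[i + 1])]
--         mode = next(iter(modes))
--         a, b, c = modes[mode]
--         if i < len(paths) - 2 and (mode, paths[i + 2]) in transfer_info:
--             x, y, z = transfer_info[(mode, paths[i + 2])]["换装时间"]
--             a, b, c = a + x, b + y, c + z
--         deltas.append((a, b, c))
--     # Pass 2: prefix-sum the deltas into the result dict.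
--     ti_values = {paths[0]: (0, 0, 0)}
--     ti = (0, 0, 0)
--     for node, d in zip(paths[1:], deltas):
--         ti = (ti[0] + d[0], ti[1] + d[1], ti[2] + d[2])
--         ti_values[node] = ti
--     return ti_values
-- ===== Notes on version B (the rewrite author's own statement) =====
-- stated objective: alternative
-- what changed: B splits A's single fused loop into two passes: it first maps each segment to one combined (segment time + optional transfer time) delta tuple, then prefix-sums those deltas over zip(paths[1:], deltas) to fill the result dict, instead of interleaving lookups, accumulation and dict updates with index lookahead in one loop.
import Mathlib
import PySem

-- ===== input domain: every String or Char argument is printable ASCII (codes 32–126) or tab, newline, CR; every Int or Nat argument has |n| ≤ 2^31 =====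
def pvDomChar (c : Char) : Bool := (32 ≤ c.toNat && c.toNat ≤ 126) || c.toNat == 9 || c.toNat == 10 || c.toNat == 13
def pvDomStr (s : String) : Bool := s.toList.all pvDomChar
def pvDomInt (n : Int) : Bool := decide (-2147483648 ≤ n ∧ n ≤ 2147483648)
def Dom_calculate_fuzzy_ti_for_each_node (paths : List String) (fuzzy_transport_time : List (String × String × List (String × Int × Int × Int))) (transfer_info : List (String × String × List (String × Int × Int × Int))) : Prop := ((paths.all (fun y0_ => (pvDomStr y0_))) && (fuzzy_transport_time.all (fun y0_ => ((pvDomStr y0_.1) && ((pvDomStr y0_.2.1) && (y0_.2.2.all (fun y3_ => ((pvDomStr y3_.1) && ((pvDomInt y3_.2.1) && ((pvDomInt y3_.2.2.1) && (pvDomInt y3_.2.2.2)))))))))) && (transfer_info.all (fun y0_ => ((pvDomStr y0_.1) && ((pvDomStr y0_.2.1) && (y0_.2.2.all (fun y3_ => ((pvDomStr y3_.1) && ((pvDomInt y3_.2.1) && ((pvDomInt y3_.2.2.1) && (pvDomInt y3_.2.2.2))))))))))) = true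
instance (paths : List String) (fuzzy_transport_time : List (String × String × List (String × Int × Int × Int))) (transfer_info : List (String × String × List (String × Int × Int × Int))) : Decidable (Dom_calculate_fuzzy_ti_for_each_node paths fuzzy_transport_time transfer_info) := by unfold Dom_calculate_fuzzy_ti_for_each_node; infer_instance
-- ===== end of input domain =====

-- ===== PORT A =====
-- B separates per-segment delta computation (a map) from the prefix-sum accumulation (a zip-fold),
-- where A fuses lookup, accumulation and dict update in one indexed loop; same O(n) cost (objective: alternative).
-- Shared helpers (Python dict-with-tuple-key lookup and element-wise 3-tuple addition).
def pvLookup2 (l : List (String × String × List (String × Int × Int × Int))) (a b : String) : Option (List (String × Int × Int × Int)) :=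
  (l.find? (fun e => e.1 == a && e.2.1 == b)).map (·.2.2)

def pvTadd (a b : Int × Int × Int) : Int × Int × Int := (a.1 + b.1, a.2.1 + b.2.1, a.2.2 + b.2.2)

-- Port of A: one fold over range(len(paths)-1) carrying (ti, dict). All list indices that occur are
-- nonnegative and in range, so `getD` is exact; `.getD`-defaults stand where Python raises
-- (KeyError / IndexError) — those inputs are excluded by Pre_ below.
def calculate_fuzzy_ti_for_each_node (paths : List String) (fuzzy_transport_time : List (String × String × List (String × Int × Int × Int))) (transfer_info : List (String × String × List (String × Int × Int × Int))) : List (String × Int × Int × Int) :=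
  match paths with
  | [] => []  -- paths[0] raises IndexError; outside Pre_
  | p0 :: _ =>
    let st := (List.range (paths.length - 1)).foldl
      (fun (st : (Int × Int × Int) × PySem.Dict String (Int × Int × Int)) (i : Nat) =>
        let current_node := paths.getD i ""
        let next_node := paths.getD (i + 1) ""
        let modes := (pvLookup2 fuzzy_transport_time current_node next_node).getD []
        let transport_mode := modes.head?.map (·.1)
        let segment_fuzzy_time :=
          (transport_mode.bind (fun m => (modes.find? (fun e => e.1 == m)).map (·.2))).getD (0, 0, 0)
        let ti1 := pvTadd st.1 segment_fuzzy_time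
        let ti2 :=
          if i < paths.length - 2 then
            match transport_mode.bind (fun m => pvLookup2 transfer_info m (paths.getD (i + 2) "")) with
            | some inner =>
                pvTadd ti1 (((inner.find? (fun e => e.1 == "换装时间")).map (·.2)).getD (0, 0, 0))
            | none => ti1
          else ti1
        (ti2, st.2.insert next_node ti2))
      ((0, 0, 0), (PySem.Dict.empty).insert p0 (0, 0, 0))
    st.2.items

-- ===== PORT B =====
-- per-segment combined delta (segment time + optional transfer time), pass 1 of Source B
def pvDelta (paths : List String) (fuzzy_transport_time : List (String × String × List (String × Int × Int × Int))) (transfer_info : List (String × String × List (String × Int × Int × Int))) (i : Nat) : Int × Int × Int :=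
  let modes := (pvLookup2 fuzzy_transport_time (paths.getD i "") (paths.getD (i + 1) "")).getD []
  let mode := modes.head?.map (·.1)
  let d := (mode.bind (fun m => (modes.find? (fun e => e.1 == m)).map (·.2))).getD (0, 0, 0)
  if i < paths.length - 2 then
    match mode.bind (fun m => pvLookup2 transfer_info m (paths.getD (i + 2) "")) with
    | some inner => pvTadd d (((inner.find? (fun e => e.1 == "换装时间")).map (·.2)).getD (0, 0, 0))
    | none => d
  else d

def calculate_fuzzy_ti_for_each_node_alt (paths : List String) (fuzzy_transport_time : List (String × String × List (String × Int × Int × Int))) (transfer_info : List (String × String × List (String × Int × Int × Int))) : List (String × Int × Int × Int) :=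
  match paths with
  | [] => []  -- paths[0] raises IndexError; outside Pre_
  | p0 :: _ =>
    let deltas := (List.range (paths.length - 1)).map
      (pvDelta paths fuzzy_transport_time transfer_info)
    let st := ((paths.drop 1).zip deltas).foldl
      (fun (st : (Int × Int × Int) × PySem.Dict String (Int × Int × Int)) nd =>
        let ti := pvTadd st.1 nd.2
        (ti, st.2.insert nd.1 ti))
      ((0, 0, 0), (PySem.Dict.empty).insert p0 (0, 0, 0))
    st.2.items

-- ===== PRECONDITION & SPEC =====
-- Pre_ excludes exactly the inputs where the Python A raises: an empty path (IndexError on paths[0]);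
-- a segment pair missing from fuzzy_transport_time or mapped to an empty mode dict (KeyError); and a
-- segment whose (first mode, next-next node) is a key of transfer_info but whose inner dict lacks the
-- key "换装时间" (KeyError). Transfer hits whose inner dict carries "换装时间" stay inside Pre_.
def Pre_calculate_fuzzy_ti_for_each_node (paths : List String) (fuzzy_transport_time : List (String × String × List (String × Int × Int × Int))) (transfer_info : List (String × String × List (String × Int × Int × Int))) : Prop :=
  paths ≠ [] ∧ ∀ i < paths.length - 1,
    (pvLookup2 fuzzy_transport_time (paths.getD i "") (paths.getD (i + 1) "")).getD [] ≠ [] ∧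
    (i < paths.length - 2 →
      ((pvLookup2 transfer_info
          ((((pvLookup2 fuzzy_transport_time (paths.getD i "") (paths.getD (i + 1) "")).getD []).headD ("", 0, 0, 0)).1)
          (paths.getD (i + 2) "")).all
        (fun inner => (inner.find? (fun e => e.1 == "换装时间")).isSome)) = true)
instance (paths : List String) (fuzzy_transport_time : List (String × String × List (String × Int × Int × Int))) (transfer_info : List (String × String × List (String × Int × Int × Int))) : Decidable (Pre_calculate_fuzzy_ti_for_each_node paths fuzzy_transport_time transfer_info) := by unfold Pre_calculate_fuzzy_ti_for_each_node; infer_instance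

def pvWitness_calculate_fuzzy_ti_for_each_node : List String × (List (String × String × List (String × Int × Int × Int))) × (List (String × String × List (String × Int × Int × Int))) :=
  (["a", "b"], [("a", "b", [("rail", 1, 2, 3)])], [])

def Spec_calculate_fuzzy_ti_for_each_node (paths : List String) (fuzzy_transport_time : List (String × String × List (String × Int × Int × Int))) (transfer_info : List (String × String × List (String × Int × Int × Int))) (out : List (String × Int × Int × Int)) : Prop := out = calculate_fuzzy_ti_for_each_node_alt paths fuzzy_transport_time transfer_info
instance (paths : List String) (fuzzy_transport_time : List (String × String × List (String × Int × Int × Int))) (transfer_info : List (String × String × List (String × Int × Int × Int))) (out : List (String × Int × Int × Int)) : Decidable (Spec_calculate_fuzzy_ti_for_each_node paths fuzzy_transport_time transfer_info out) := by unfold Spec_calculate_fuzzy_ti_for_each_node; infer_instance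

-- ===== CLAIM (what is proved, stated in full; the proofs are below) =====
def Claim_equal_calculate_fuzzy_ti_for_each_node : Prop := ∀ (paths : List String) (fuzzy_transport_time : List (String × String × List (String × Int × Int × Int))) (transfer_info : List (String × String × List (String × Int × Int × Int))), Dom_calculate_fuzzy_ti_for_each_node paths fuzzy_transport_time transfer_info → Pre_calculate_fuzzy_ti_for_each_node paths fuzzy_transport_time transfer_info → Spec_calculate_fuzzy_ti_for_each_node paths fuzzy_transport_time transfer_info (calculate_fuzzy_ti_for_each_node paths fuzzy_transport_time transfer_info)

-- ===== LEMMAS AND PROOFS =====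

theorem pvTadd_assoc (a b c : Int × Int × Int) : pvTadd (pvTadd a b) c = pvTadd a (pvTadd b c) := by
  simp [pvTadd]; omega

theorem pvDrop_one_eq_map (paths : List String) :
    paths.drop 1 = (List.range (paths.length - 1)).map (fun i => paths.getD (i + 1) "") := by
  apply List.ext_getElem
  · simp
  · intro i h1 h2
    simp at h1 h2 ⊢
    rw [List.getElem?_eq_getElem (by omega)]
    rfl

-- ===== VERDICT (by name: the statement is the Claim_ definition above) =====
theorem calculate_fuzzy_ti_for_each_node_spec : Claim_equal_calculate_fuzzy_ti_for_each_node := by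
  intro paths ftt tri _ _
  unfold Spec_calculate_fuzzy_ti_for_each_node
  unfold calculate_fuzzy_ti_for_each_node calculate_fuzzy_ti_for_each_node_alt
  match paths with
  | [] => rfl
  | p0 :: rest =>
    simp only []
    rw [pvDrop_one_eq_map (p0 :: rest), List.zip_map', List.foldl_map]
    congr 1
    congr 1
    congr 1
    funext st i
    by_cases h : i < (p0 :: rest).length - 2
    · simp only [pvDelta, if_pos h]
      rcases hE : (Option.map (fun x => x.1)
          ((pvLookup2 ftt ((p0 :: rest).getD i "") ((p0 :: rest).getD (i + 1) "")).getD []).head?).bind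
          (fun m => pvLookup2 tri m ((p0 :: rest).getD (i + 2) "")) with _ | inner
      · rfl
      · simp only [pvTadd_assoc]
    · simp only [pvDelta, if_neg h]
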